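-- pv_equiv track=rewrite | github.com/20hajiyev/packet-tracer-skill | scripts/generate_pkt.py | _primary_rejection_code
-- ===== SOURCE A (Python) =====
-- def _primary_rejection_code(rejection_reasons: list[str]) -> str | None:
--     normalized = [str(item).strip().lower() for item in rejection_reasons if str(item).strip()]
--     if any("runtime subtree" in reason for reason in normalized):
--         return "runtime_subtree_missing"
--     if any("archetype_gap:" in reason or "archetype does not align" in reason for reason in normalized):
--         return "archetype_misaligned"
--     if any(
--         marker in reason
--         for reason in normalized
--         for marker in (
--             "missing_link_pairs:",
--             "no reusable link pairs",
--             "reuses too little of the requested link skeleton",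
--             "cannot create new donor link pair",
--             "requires donor link reuse",
--             "port mismatch",
--             "media mismatch",
--             "ports/media",
--         )
--     ):
--         return "layout_reuse_too_weak"
--     if any(
--         marker in reason
--         for reason in normalized
--         for marker in (
--             "acceptance penalty",
--             "acceptance_gated",
--             "acceptance-gated",
--             "acceptance fixture",
--             "acceptance evidence",
--             "acceptance risk",
--         )
--     ):
--         return "acceptance_evidence_too_weak"
--     return None
-- ===== SOURCE B (Python) =====
-- # Single-pass re-implementation: one ordered priority table, one loop over the
-- # reasons keeping the best (highest-priority) matching category.
--
-- _PRIORITY = [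
--     ("runtime_subtree_missing", ("runtime subtree",)),
--     ("archetype_misaligned", ("archetype_gap:", "archetype does not align")),
--     (
--         "layout_reuse_too_weak",
--         (
--             "missing_link_pairs:",
--             "no reusable link pairs",
--             "reuses too little of the requested link skeleton",
--             "cannot create new donor link pair",
--             "requires donor link reuse",
--             "port mismatch",
--             "media mismatch",
--             "ports/media",
--         ),
--     ),
--     (
--         "acceptance_evidence_too_weak",
--         (
--             "acceptance penalty",
--             "acceptance_gated",
--             "acceptance-gated",
--             "acceptance fixture",
--             "acceptance evidence",
--             "acceptance risk",
--         ),
--     ),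
-- ]
--
-- _RANK = {code: i for i, (code, _) in enumerate(_PRIORITY)}
--
--
-- def _classify(reason):
--     for code, markers in _PRIORITY:
--         if any(m in reason for m in markers):
--             return code
--     return None
--
--
-- def _primary_rejection_code(rejection_reasons: list[str]) -> str | None:
--     best = None
--     for item in rejection_reasons:
--         reason = str(item).strip().lower()
--         if not reason:
--             continue
--         code = _classify(reason)
--         if code is not None and (best is None or _RANK[code] < _RANK[best]):
--             best = code
--     return best
-- ===== Notes on version B (the rewrite author's own statement) =====
-- stated objective: simpler
-- what changed: Replaced A's four sequential any-scans over the full normalized list by one ordered priority table and a single pass over the reasons that keeps the highest-priority matching category.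
import Mathlib
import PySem

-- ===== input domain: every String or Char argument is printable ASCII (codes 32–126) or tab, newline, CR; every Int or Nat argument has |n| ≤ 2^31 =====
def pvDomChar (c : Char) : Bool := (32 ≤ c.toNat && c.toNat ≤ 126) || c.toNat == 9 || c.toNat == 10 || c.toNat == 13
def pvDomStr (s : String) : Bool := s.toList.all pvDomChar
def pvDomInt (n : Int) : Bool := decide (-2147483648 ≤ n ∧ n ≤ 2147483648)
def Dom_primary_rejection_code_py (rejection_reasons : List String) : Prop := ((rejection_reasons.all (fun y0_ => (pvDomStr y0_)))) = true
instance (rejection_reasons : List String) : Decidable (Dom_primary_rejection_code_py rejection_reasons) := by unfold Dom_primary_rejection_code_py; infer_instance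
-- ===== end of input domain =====

-- B replaces A's four sequential any-scans by one ordered priority table and a
-- single pass over the reasons keeping the highest-priority matching category
-- (objective: simpler).

-- ===== PORT A =====
def primary_rejection_code_py (rejection_reasons : List String) : Option String :=
  let normalized := rejection_reasons.filterMap (fun item =>
    if PySem.Str.strip item ≠ "" then some (PySem.Str.lower (PySem.Str.strip item)) else none)
  if normalized.any (fun reason => PySem.Str.isIn "runtime subtree" reason) then
    some "runtime_subtree_missing"
  else if normalized.any (fun reason =>
      PySem.Str.isIn "archetype_gap:" reason || PySem.Str.isIn "archetype does not align" reason) then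
    some "archetype_misaligned"
  else if normalized.any (fun reason =>
      ["missing_link_pairs:", "no reusable link pairs",
       "reuses too little of the requested link skeleton",
       "cannot create new donor link pair", "requires donor link reuse",
       "port mismatch", "media mismatch", "ports/media"].any
        (fun marker => PySem.Str.isIn marker reason)) then
    some "layout_reuse_too_weak"
  else if normalized.any (fun reason =>
      ["acceptance penalty", "acceptance_gated", "acceptance-gated",
       "acceptance fixture", "acceptance evidence", "acceptance risk"].any
        (fun marker => PySem.Str.isIn marker reason)) then
    some "acceptance_evidence_too_weak"
  else none

-- ===== PORT B =====
def pvPriority : List (String × List String) :=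
  [("runtime_subtree_missing", ["runtime subtree"]),
   ("archetype_misaligned", ["archetype_gap:", "archetype does not align"]),
   ("layout_reuse_too_weak",
      ["missing_link_pairs:", "no reusable link pairs",
       "reuses too little of the requested link skeleton",
       "cannot create new donor link pair", "requires donor link reuse",
       "port mismatch", "media mismatch", "ports/media"]),
   ("acceptance_evidence_too_weak",
      ["acceptance penalty", "acceptance_gated", "acceptance-gated",
       "acceptance fixture", "acceptance evidence", "acceptance risk"])]

-- _RANK = {code: i for i, (code, _) in enumerate(_PRIORITY)}
def pvRank : PySem.Dict String Int :=
  PySem.Dict.ofList ((PySem.List.enumerate pvPriority).map (fun p => (p.2.1, p.1)))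

-- _classify: first table entry whose marker set matches (loop with early return = find?)
def pvClassify (reason : String) : Option String :=
  (pvPriority.find? (fun p => p.2.any (fun m => PySem.Str.isIn m reason))).map (fun p => p.1)

-- the single pass of B's loop; _RANK[code] ported as getD (only valid codes reach it)
def pvAltLoop : List String → Option String → Option String
  | [], best => best
  | item :: rest, best =>
    let reason := PySem.Str.lower (PySem.Str.strip item)
    if reason = "" then pvAltLoop rest best
    else
      match pvClassify reason with
      | none => pvAltLoop rest best
      | some code =>
        match best with
        | none => pvAltLoop rest (some code)
        | some b =>
          if PySem.Dict.getD pvRank code 0 < PySem.Dict.getD pvRank b 0 then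
            pvAltLoop rest (some code)
          else
            pvAltLoop rest best

def primary_rejection_code_py_alt (rejection_reasons : List String) : Option String :=
  pvAltLoop rejection_reasons none

-- ===== PRECONDITION & SPEC =====
def Spec_primary_rejection_code_py (rejection_reasons : List String) (out : Option String) : Prop := out = primary_rejection_code_py_alt rejection_reasons
instance (rejection_reasons : List String) (out : Option String) : Decidable (Spec_primary_rejection_code_py rejection_reasons out) := by unfold Spec_primary_rejection_code_py; infer_instance

-- ===== CLAIM (what is proved, stated in full; the proofs are below) =====
def Claim_equal_primary_rejection_code_py : Prop := ∀ (rejection_reasons : List String), Dom_primary_rejection_code_py rejection_reasons → Spec_primary_rejection_code_py rejection_reasons (primary_rejection_code_py rejection_reasons)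

-- ===== LEMMAS AND PROOFS =====

-- rank of an optional category code; none (no category) ranks below everything
def pvRankO (o : Option String) : Int :=
  match o with
  | none => 4
  | some c => PySem.Dict.getD pvRank c 0

-- priority merge: keep the lower-ranked (higher-priority) of the two, left-biased
def pvBetter (x y : Option String) : Option String :=
  if pvRankO y < pvRankO x then y else x

-- the only values either program ever holds as a category
def pvValid (o : Option String) : Prop :=
  o = none ∨ o = some "runtime_subtree_missing" ∨ o = some "archetype_misaligned" ∨
  o = some "layout_reuse_too_weak" ∨ o = some "acceptance_evidence_too_weak"

-- A's four per-reason tests, named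
def pvP0 (r : String) : Bool := PySem.Str.isIn "runtime subtree" r
def pvP1 (r : String) : Bool :=
  PySem.Str.isIn "archetype_gap:" r || PySem.Str.isIn "archetype does not align" r
def pvP2 (r : String) : Bool :=
  ["missing_link_pairs:", "no reusable link pairs",
   "reuses too little of the requested link skeleton",
   "cannot create new donor link pair", "requires donor link reuse",
   "port mismatch", "media mismatch", "ports/media"].any
    (fun marker => PySem.Str.isIn marker r)
def pvP3 (r : String) : Bool :=
  ["acceptance penalty", "acceptance_gated", "acceptance-gated",
   "acceptance fixture", "acceptance evidence", "acceptance risk"].any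
    (fun marker => PySem.Str.isIn marker r)

-- A's if-chain as a function of the normalized list
def pvChain (ns : List String) : Option String :=
  if ns.any pvP0 then some "runtime_subtree_missing"
  else if ns.any pvP1 then some "archetype_misaligned"
  else if ns.any pvP2 then some "layout_reuse_too_weak"
  else if ns.any pvP3 then some "acceptance_evidence_too_weak"
  else none

def pvNormalize (rs : List String) : List String :=
  rs.filterMap (fun item =>
    if PySem.Str.strip item ≠ "" then some (PySem.Str.lower (PySem.Str.strip item)) else none)

theorem pvA_eq_chain (rs : List String) :
    primary_rejection_code_py rs = pvChain (pvNormalize rs) := rfl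

theorem pvChain_valid (ns : List String) : pvValid (pvChain ns) := by
  unfold pvChain pvValid
  split_ifs <;> simp

theorem pvA_valid (rs : List String) : pvValid (primary_rejection_code_py rs) := by
  rw [pvA_eq_chain]; exact pvChain_valid _

theorem pvClassify_eq (r : String) : pvClassify r = pvChain [r] := by
  unfold pvClassify pvPriority pvChain pvP0 pvP1 pvP2 pvP3
  simp only [List.find?, List.any_cons, List.any_nil, Bool.or_false]
  repeat' split
  all_goals simp_all

theorem pv_lower_empty_iff (s : String) : PySem.Str.lower s = "" ↔ s = "" := by
  have hnil : ∀ t : String, t = "" ↔ t.toList = [] := by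
    intro t; rw [← String.toList_inj]; simp
  rw [hnil, hnil, PySem.Str.toList_lower]
  simp [PySem.Chars.lower]

theorem pvChain_cons (r : String) (ns : List String) :
    pvChain (r :: ns) = pvBetter (pvChain ns) (pvChain [r]) := by
  unfold pvChain
  simp only [List.any_cons, List.any_nil, Bool.or_false]
  by_cases h0 : pvP0 r <;> by_cases h1 : pvP1 r <;> by_cases h2 : pvP2 r <;>
    by_cases h3 : pvP3 r <;>
    by_cases a0 : ns.any pvP0 <;> by_cases a1 : ns.any pvP1 <;>
    by_cases a2 : ns.any pvP2 <;> by_cases a3 : ns.any pvP3 <;>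
    simp only [h0, h1, h2, h3, a0, a1, a2, a3, Bool.true_or, Bool.or_true,
      Bool.false_or, Bool.or_false, if_true, if_false, ite_true, ite_false] <;>
    decide

theorem pvA_cons (item : String) (rs : List String) :
    primary_rejection_code_py (item :: rs) =
      (if PySem.Str.lower (PySem.Str.strip item) = "" then primary_rejection_code_py rs
       else pvBetter (primary_rejection_code_py rs)
              (pvClassify (PySem.Str.lower (PySem.Str.strip item)))) := by
  by_cases he : PySem.Str.strip item = ""
  · rw [if_pos ((pv_lower_empty_iff _).mpr he), pvA_eq_chain, pvA_eq_chain]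
    have : pvNormalize (item :: rs) = pvNormalize rs := by
      simp [pvNormalize, he]
    rw [this]
  · rw [if_neg (fun h => he ((pv_lower_empty_iff _).mp h)),
      pvA_eq_chain, pvA_eq_chain, pvClassify_eq]
    have : pvNormalize (item :: rs) =
        PySem.Str.lower (PySem.Str.strip item) :: pvNormalize rs := by
      simp [pvNormalize, he]
    rw [this, pvChain_cons]

theorem pvBetter_assoc (x y z : Option String)
    (hx : pvValid x) (hy : pvValid y) (hz : pvValid z) :
    pvBetter (pvBetter x y) z = pvBetter x (pvBetter y z) := by
  rcases hx with h | h | h | h | h <;> subst h <;>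
    rcases hy with h | h | h | h | h <;> subst h <;>
      rcases hz with h | h | h | h | h <;> subst h <;> decide

theorem pvBetter_valid (x y : Option String) (hx : pvValid x) (hy : pvValid y) :
    pvValid (pvBetter x y) := by
  rcases hx with h | h | h | h | h <;> subst h <;>
    rcases hy with h | h | h | h | h <;> subst h <;> unfold pvValid <;> decide

theorem pvBetter_none_right (x : Option String) (hx : pvValid x) : pvBetter x none = x := by
  rcases hx with h | h | h | h | h <;> subst h <;> decide

theorem pvBetter_none_left (x : Option String) (hx : pvValid x) : pvBetter none x = x := by
  rcases hx with h | h | h | h | h <;> subst h <;> decide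

theorem pvAltLoop_cons (item : String) (rest : List String) (best : Option String) :
    pvAltLoop (item :: rest) best =
      (if PySem.Str.lower (PySem.Str.strip item) = "" then pvAltLoop rest best
       else
         match pvClassify (PySem.Str.lower (PySem.Str.strip item)) with
         | none => pvAltLoop rest best
         | some code =>
           match best with
           | none => pvAltLoop rest (some code)
           | some b =>
             if PySem.Dict.getD pvRank code 0 < PySem.Dict.getD pvRank b 0 then
               pvAltLoop rest (some code)
             else pvAltLoop rest best) := rfl

theorem pvA_cons_empty (item : String) (rs : List String)
    (he : PySem.Str.lower (PySem.Str.strip item) = "") :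
    primary_rejection_code_py (item :: rs) = primary_rejection_code_py rs := by
  rw [pvA_cons, if_pos he]

set_option maxHeartbeats 800000 in
theorem pvA_cons_ne (item : String) (rs : List String)
    (he : ¬ PySem.Str.lower (PySem.Str.strip item) = "") :
    primary_rejection_code_py (item :: rs) =
      pvBetter (primary_rejection_code_py rs)
        (pvClassify (PySem.Str.lower (PySem.Str.strip item))) := by
  rw [pvA_cons, if_neg he]

theorem pvBetter_comm (x y : Option String) (hx : pvValid x) (hy : pvValid y) :
    pvBetter x y = pvBetter y x := by
  rcases hx with h | h | h | h | h <;> subst h <;>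
    rcases hy with h | h | h | h | h <;> subst h <;> decide

theorem pvAltLoop_step (item : String) (rest : List String) (best : Option String)
    (he : ¬ PySem.Str.lower (PySem.Str.strip item) = "")
    (hb : pvValid best)
    (hc : pvValid (pvClassify (PySem.Str.lower (PySem.Str.strip item)))) :
    pvAltLoop (item :: rest) best =
      pvAltLoop rest (pvBetter best (pvClassify (PySem.Str.lower (PySem.Str.strip item)))) := by
  rw [pvAltLoop_cons, if_neg he]
  rcases hc with h | h | h | h | h <;> rw [h] <;>
    rcases hb with h2 | h2 | h2 | h2 | h2 <;> subst h2 <;> dsimp only <;>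
    (try rw [← apply_ite (pvAltLoop rest)]) <;> congr 1 <;> decide

-- loop invariant: the single pass computes the priority-merge of A's answer with the accumulator
theorem pvAltLoop_eq (rs : List String) :
    ∀ best, pvValid best → pvAltLoop rs best = pvBetter best (primary_rejection_code_py rs) := by
  induction rs with
  | nil =>
    intro best hb
    have hA : primary_rejection_code_py [] = none := rfl
    rw [hA, pvBetter_none_right best hb]
    rfl
  | cons item rest ih =>
    intro best hb
    by_cases he : PySem.Str.lower (PySem.Str.strip item) = ""
    · rw [pvAltLoop_cons, if_pos he, pvA_cons_empty item rest he]
      exact ih best hb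
    · have hc : pvValid (pvClassify (PySem.Str.lower (PySem.Str.strip item))) := by
        rw [pvClassify_eq]; exact pvChain_valid _
      rw [pvAltLoop_step item rest best he hb hc,
        ih _ (pvBetter_valid _ _ hb hc),
        pvA_cons_ne item rest he,
        pvBetter_assoc best _ _ hb hc (pvA_valid rest),
        pvBetter_comm _ (primary_rejection_code_py rest) hc (pvA_valid rest)]

-- ===== VERDICT (by name: the statement is the Claim_ definition above) =====
theorem primary_rejection_code_py_spec : Claim_equal_primary_rejection_code_py := by
  intro rs _
  unfold Spec_primary_rejection_code_py primary_rejection_code_py_alt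
  rw [pvAltLoop_eq rs none (Or.inl rfl),
    pvBetter_none_left _ (pvA_valid rs)]
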